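-- pv_equiv track=rewrite | github.com/Tinevagio/skitour-digest | src/scraper.py | get_groups_for_ids
-- ===== SOURCE A (Python) =====
-- MASSIF_GROUPS = {
--     "Haute-Savoie": {
--         22: "Bornes - Aravis",
--         23: "Chablais - Faucigny",
--         24: "Haut Giffre - Aiguilles Rouges",
--         25: "Mont Blanc",
--     },
--     "Savoie": {
--         17: "Alpes Grées N",
--         15: "Alpes Grées S",
--         20:  "Bauges",
--         21: "Beaufortain",
--         19: "Lauzière - Cheval Noir",
--         18: "Vanoise",
--     },
--     "Isère": {
--         12:  "Belledonne",
--         11:  "Chartreuse",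
--         13: "Grandes Rousses - Arves",
--         9: "Taillefer - Matheysine",
--         10:  "Vercors",
--     },
--     "Hautes-Alpes": {
--         14: "Cerces - Thabor - Mont Cenis",
--         8: "Devoluy",
--         7: "Ecrins",
--     },
-- }
--
-- def get_groups_for_ids(massif_ids: list[int]) -> dict[str, list[int]]:
--     """
--     Retourne un dict {groupe: [ids]} pour les massifs demandés.
--     Les IDs non trouvés dans MASSIF_GROUPS vont dans un groupe 'Autres'.
--     """
--     groups: dict[str, list[int]] = {}
--     for mid in massif_ids:
--         found = False
--         for group_name, members in MASSIF_GROUPS.items():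
--             if mid in members:
--                 groups.setdefault(group_name, []).append(mid)
--                 found = True
--                 break
--         if not found:
--             groups.setdefault("Autres", []).append(mid)
--     return groups
-- ===== SOURCE B (Python) =====
-- MASSIF_GROUPS = {
--     "Haute-Savoie": {
--         22: "Bornes - Aravis",
--         23: "Chablais - Faucigny",
--         24: "Haut Giffre - Aiguilles Rouges",
--         25: "Mont Blanc",
--     },
--     "Savoie": {
--         17: "Alpes Grées N",
--         15: "Alpes Grées S",
--         20:  "Bauges",
--         21: "Beaufortain",
--         19: "Lauzière - Cheval Noir",
--         18: "Vanoise",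
--     },
--     "Isère": {
--         12:  "Belledonne",
--         11:  "Chartreuse",
--         13: "Grandes Rousses - Arves",
--         9: "Taillefer - Matheysine",
--         10:  "Vercors",
--     },
--     "Hautes-Alpes": {
--         14: "Cerces - Thabor - Mont Cenis",
--         8: "Devoluy",
--         7: "Ecrins",
--     },
-- }
--
-- # Reverse index built once: massif id -> group name.
-- ID_TO_GROUP = {mid: group_name
--                for group_name, members in MASSIF_GROUPS.items()
--                for mid in members}
--
-- def get_groups_for_ids(massif_ids: list[int]) -> dict[str, list[int]]:
--     # Staged: label every id via the reverse index, dedupe the labels in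
--     # first-encounter order, then gather each bucket with a filter.
--     labels = [ID_TO_GROUP.get(mid, "Autres") for mid in massif_ids]
--     return {g: [mid for mid, lab in zip(massif_ids, labels) if lab == g]
--             for g in dict.fromkeys(labels)}
-- ===== Notes on version B (the rewrite author's own statement) =====
-- stated objective: alternative
-- what changed: Replaces A's dict-building fold with nested group scan and 'found' flag by a staged pipeline: a reverse index id->group built once, a map labelling every id, an ordered dedup of the labels, and one filter per distinct label to gather its bucket.
import Mathlib
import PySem

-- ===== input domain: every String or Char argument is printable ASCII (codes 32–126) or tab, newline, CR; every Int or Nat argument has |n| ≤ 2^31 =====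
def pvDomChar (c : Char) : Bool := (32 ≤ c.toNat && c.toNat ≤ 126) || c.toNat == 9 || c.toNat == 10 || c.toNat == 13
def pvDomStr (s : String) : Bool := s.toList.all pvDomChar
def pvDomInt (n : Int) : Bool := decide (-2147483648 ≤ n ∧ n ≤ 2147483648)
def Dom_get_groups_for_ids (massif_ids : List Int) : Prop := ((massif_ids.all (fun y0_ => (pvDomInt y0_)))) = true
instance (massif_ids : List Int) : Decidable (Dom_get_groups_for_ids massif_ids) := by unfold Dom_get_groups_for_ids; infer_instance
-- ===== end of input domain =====

-- B replaces A's dict-building fold (nested group scan + 'found' flag) by a staged pipeline: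
-- reverse index built once, a labelling map, an ordered dedup of the labels, one filter per
-- distinct label (objective: alternative decomposition, same result).

-- MASSIF_GROUPS, module-level data shared by both programs
def pvMassifGroups : List (String × List (Int × String)) :=
  [ ("Haute-Savoie",
      [(22, "Bornes - Aravis"), (23, "Chablais - Faucigny"),
       (24, "Haut Giffre - Aiguilles Rouges"), (25, "Mont Blanc")]),
    ("Savoie",
      [(17, "Alpes Grées N"), (15, "Alpes Grées S"), (20, "Bauges"),
       (21, "Beaufortain"), (19, "Lauzière - Cheval Noir"), (18, "Vanoise")]),
    ("Isère",
      [(12, "Belledonne"), (11, "Chartreuse"), (13, "Grandes Rousses - Arves"),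
       (9, "Taillefer - Matheysine"), (10, "Vercors")]),
    ("Hautes-Alpes",
      [(14, "Cerces - Thabor - Mont Cenis"), (8, "Devoluy"), (7, "Ecrins")]) ]

-- ===== PORT A =====
-- inner loop 'for group_name, members in MASSIF_GROUPS.items(): if mid in members: …; break'
-- together with the 'found' flag (some = found and broke, none = not found)
def pvFindGroup (mid : Int) : List (String × List (Int × String)) → Option String
  | [] => none
  | (group_name, members) :: rest =>
      if members.any (fun kv => kv.1 == mid) then some group_name
      else pvFindGroup mid rest

-- groups.setdefault(g, []).append(mid)  =  d[g] = d.get(g, []) + [mid], new keys appended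
def get_groups_for_ids (massif_ids : List Int) : List (String × List Int) :=
  (massif_ids.foldl (fun groups mid =>
    match pvFindGroup mid pvMassifGroups with
    | some group_name => groups.modify group_name [] (· ++ [mid])
    | none => groups.modify "Autres" [] (· ++ [mid])) PySem.Dict.empty).items

-- ===== PORT B =====
-- ID_TO_GROUP = {mid: group_name for group_name, members in MASSIF_GROUPS.items() for mid in members}
def pvIdToGroup : PySem.Dict Int String :=
  pvMassifGroups.foldl (fun acc gm =>
    gm.2.foldl (fun acc2 kv => PySem.Dict.insert acc2 kv.1 gm.1) acc) PySem.Dict.empty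

-- labels = [ID_TO_GROUP.get(mid, "Autres") for mid in massif_ids]
-- {g: [mid for mid, lab in zip(massif_ids, labels) if lab == g] for g in dict.fromkeys(labels)}
def get_groups_for_ids_alt (massif_ids : List Int) : List (String × List Int) :=
  let labels := massif_ids.map (fun mid => PySem.Dict.getD pvIdToGroup mid "Autres")
  (PySem.List.dedup labels).map (fun g =>
    (g, ((massif_ids.zip labels).filter (fun p => p.2 == g)).map (·.1)))

-- ===== PRECONDITION & SPEC =====
def Spec_get_groups_for_ids (massif_ids : List Int) (out : List (String × List Int)) : Prop := out = get_groups_for_ids_alt massif_ids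
instance (massif_ids : List Int) (out : List (String × List Int)) : Decidable (Spec_get_groups_for_ids massif_ids out) := by unfold Spec_get_groups_for_ids; infer_instance

-- ===== CLAIM (what is proved, stated in full; the proofs are below) =====
def Claim_equal_get_groups_for_ids : Prop := ∀ (massif_ids : List Int), Dom_get_groups_for_ids massif_ids → Spec_get_groups_for_ids massif_ids (get_groups_for_ids massif_ids)

-- ===== LEMMAS AND PROOFS =====

-- the label B assigns to an id
def pvLabel (mid : Int) : String := PySem.Dict.getD pvIdToGroup mid "Autres"

-- B's comprehension evaluated: the reverse index as a literal dict
theorem pvIdToGroup_eq : pvIdToGroup = PySem.Dict.mk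
    [(22,"Haute-Savoie"),(23,"Haute-Savoie"),(24,"Haute-Savoie"),(25,"Haute-Savoie"),
     (17,"Savoie"),(15,"Savoie"),(20,"Savoie"),(21,"Savoie"),(19,"Savoie"),(18,"Savoie"),
     (12,"Isère"),(11,"Isère"),(13,"Isère"),(9,"Isère"),(10,"Isère"),
     (14,"Hautes-Alpes"),(8,"Hautes-Alpes"),(7,"Hautes-Alpes")] := by decide

-- the per-id group name of A's scan equals B's reverse-index lookup
theorem pvGroupName_eq (mid : Int) :
    (match pvFindGroup mid pvMassifGroups with
     | some g => g
     | none => "Autres") = pvLabel mid := by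
  by_cases h22 : mid = 22
  · subst h22; decide
  by_cases h23 : mid = 23
  · subst h23; decide
  by_cases h24 : mid = 24
  · subst h24; decide
  by_cases h25 : mid = 25
  · subst h25; decide
  by_cases h17 : mid = 17
  · subst h17; decide
  by_cases h15 : mid = 15
  · subst h15; decide
  by_cases h20 : mid = 20
  · subst h20; decide
  by_cases h21 : mid = 21
  · subst h21; decide
  by_cases h19 : mid = 19
  · subst h19; decide
  by_cases h18 : mid = 18
  · subst h18; decide
  by_cases h12 : mid = 12
  · subst h12; decide
  by_cases h11 : mid = 11
  · subst h11; decide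
  by_cases h13 : mid = 13
  · subst h13; decide
  by_cases h9 : mid = 9
  · subst h9; decide
  by_cases h10 : mid = 10
  · subst h10; decide
  by_cases h14 : mid = 14
  · subst h14; decide
  by_cases h8 : mid = 8
  · subst h8; decide
  by_cases h7 : mid = 7
  · subst h7; decide
  simp [pvFindGroup, pvMassifGroups, pvLabel, pvIdToGroup_eq, PySem.Dict.getD_eq_get?_getD,
    PySem.Dict.get?, h22,h23,h24,h25,h17,h15,h20,h21,h19,h18,h12,h11,h13,h9,h10,h14,h8,h7,
    Ne.symm]

-- A's fold characterised: its items list IS B's staged result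
theorem pvFold_items (l : List Int) :
    (l.foldl (fun groups mid =>
      PySem.Dict.modify groups (pvLabel mid) [] (· ++ [mid])) PySem.Dict.empty).items
    = (PySem.List.dedup (l.map pvLabel)).map (fun g =>
        (g, l.filter (fun x => pvLabel x == g))) := by
  have hfold : l.foldl (fun groups mid =>
      PySem.Dict.modify groups (pvLabel mid) [] (· ++ [mid])) PySem.Dict.empty
      = (l.map (fun x => ((pvLabel x, x) : String × Int))).foldl
          (fun d p => PySem.Dict.modify d p.1 [] (· ++ [p.2])) PySem.Dict.empty := by
    rw [List.foldl_map]
  have hkeys : (l.foldl (fun groups mid =>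
      PySem.Dict.modify groups (pvLabel mid) [] (· ++ [mid])) PySem.Dict.empty).keys
      = PySem.List.dedup (l.map pvLabel) := by
    rw [PySem.Dict.keys_foldl_modify_key]
    simp [PySem.Set.update_nil_left]
  have hnd : (l.foldl (fun groups mid =>
      PySem.Dict.modify groups (pvLabel mid) [] (· ++ [mid])) PySem.Dict.empty).keys.Nodup := by
    rw [hkeys]; exact PySem.List.nodup_dedup _
  rw [PySem.Dict.items_eq_map_keys _ hnd ([] : List Int), hkeys]
  apply List.map_congr_left
  intro g _
  have hget : (l.foldl (fun groups mid =>
      PySem.Dict.modify groups (pvLabel mid) [] (· ++ [mid])) PySem.Dict.empty).getD g []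
      = l.filter (fun x => pvLabel x == g) := by
    rw [hfold, PySem.Dict.getD_foldl_modify_append]
    simp [List.filter_map, Function.comp_def]
  rw [hget]

-- ===== VERDICT (by name: the statement is the Claim_ definition above) =====
theorem get_groups_for_ids_spec : Claim_equal_get_groups_for_ids := by
  intro l hdom
  clear hdom
  unfold Spec_get_groups_for_ids get_groups_for_ids get_groups_for_ids_alt
  have hstep : (fun (groups : PySem.Dict String (List Int)) (mid : Int) =>
      match pvFindGroup mid pvMassifGroups with
      | some group_name => PySem.Dict.modify groups group_name [] (· ++ [mid])
      | none => PySem.Dict.modify groups "Autres" [] (· ++ [mid]))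
      = (fun groups mid => PySem.Dict.modify groups (pvLabel mid) [] (· ++ [mid])) := by
    funext groups mid
    rw [← pvGroupName_eq mid]
    cases pvFindGroup mid pvMassifGroups <;> rfl
  rw [hstep, pvFold_items]
  have hz : l.zip (l.map pvLabel) = l.map (fun x => ((x, pvLabel x) : Int × String)) := by
    induction l with
    | nil => rfl
    | cons x xs ih => simp [ih]
  show _ = (PySem.List.dedup (l.map pvLabel)).map (fun g =>
      (g, ((l.zip (l.map pvLabel)).filter (fun p => p.2 == g)).map (·.1)))
  rw [hz]
  apply List.map_congr_left
  intro g _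
  simp [List.filter_map, Function.comp_def]
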